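-- pv_equiv track=rewrite | github.com/jgarridoa/CariocaTelegramBot | carioca_game_telegram/utils.py | parse_add_result
-- ===== SOURCE A (Python) =====
-- cards_dict = {'2': 2, '3': 3, '4': 4, '5': 5, '6': 6, '7': 7, '8': 8, '9': 9, 'T': 10, 'J': 10, 'Q': 10, 'K': 10, 'A': 20, 'C': 30 }
--
-- def parse_add_result(score):
--
--     cards = list(score)
--     total = 0
--     for card in cards:
--         try:
--             total+= cards_dict[card]
--         except KeyError:
--             return -1
--     return total
-- ===== SOURCE B (Python) =====
-- cards_dict = {'2': 2, '3': 3, '4': 4, '5': 5, '6': 6, '7': 7, '8': 8, '9': 9, 'T': 10, 'J': 10, 'Q': 10, 'K': 10, 'A': 20, 'C': 30 }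
--
-- def parse_add_result(score):
--     # Histogram approach: count each character once, then aggregate over the
--     # 14 card types; validity = the counted card characters account for the
--     # whole string.
--     counts = {}
--     for c in score:
--         counts[c] = counts.get(c, 0) + 1
--     seen = 0
--     total = 0
--     for card, value in cards_dict.items():
--         n = counts.get(card, 0)
--         seen += n
--         total += n * value
--     return total if seen == len(score) else -1
-- ===== Notes on version B (the rewrite author's own statement) =====
-- stated objective: alternative
-- what changed: Replaces A's per-character accumulate-with-try/except loop by a histogram: build a character-frequency dict in one pass, then aggregate counts over the 14 card types, declaring the input invalid when the counted card characters do not account for the whole string.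
import Mathlib
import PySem

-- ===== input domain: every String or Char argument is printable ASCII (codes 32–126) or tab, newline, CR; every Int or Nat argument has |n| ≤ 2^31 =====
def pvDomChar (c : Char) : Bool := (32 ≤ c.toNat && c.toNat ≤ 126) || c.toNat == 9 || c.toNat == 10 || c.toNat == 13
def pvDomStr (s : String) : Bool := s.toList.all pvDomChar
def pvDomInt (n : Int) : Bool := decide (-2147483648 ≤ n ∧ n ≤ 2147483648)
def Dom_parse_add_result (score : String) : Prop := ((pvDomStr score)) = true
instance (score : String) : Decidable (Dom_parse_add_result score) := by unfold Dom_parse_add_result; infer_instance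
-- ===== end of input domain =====

-- B replaces A's per-character accumulate-with-early-exit loop by a histogram: count every
-- character once, then aggregate counts over the 14 card types (alternative decomposition).
-- ===== PORT A =====
def cardVal? (c : Char) : Option Int :=
  if c = '2' then some 2 else if c = '3' then some 3 else if c = '4' then some 4
  else if c = '5' then some 5 else if c = '6' then some 6 else if c = '7' then some 7
  else if c = '8' then some 8 else if c = '9' then some 9 else if c = 'T' then some 10
  else if c = 'J' then some 10 else if c = 'Q' then some 10 else if c = 'K' then some 10
  else if c = 'A' then some 20 else if c = 'C' then some 30 else none

def parseLoop : List Char → Int → Int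
  | [], total => total
  | c :: cs, total =>
    match cardVal? c with
    | some v => parseLoop cs (total + v)
    | none => -1

def parse_add_result (score : String) : Int :=
  parseLoop score.toList 0

-- ===== PORT B =====
def cardPairs : List (Char × Int) :=
  [('2',2),('3',3),('4',4),('5',5),('6',6),('7',7),('8',8),('9',9),
   ('T',10),('J',10),('Q',10),('K',10),('A',20),('C',30)]

def parse_add_result_alt (score : String) : Int :=
  let counts : PySem.Dict Char Int :=
    score.toList.foldl (fun d c => d.insert c (d.getD c 0 + 1)) PySem.Dict.empty
  let r : Int × Int :=
    cardPairs.foldl (fun (p : Int × Int) kv =>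
      let n := counts.getD kv.1 0
      (p.1 + n, p.2 + n * kv.2)) (0, 0)
  if r.1 = PySem.Str.len score then r.2 else -1

-- ===== PRECONDITION & SPEC =====
def Spec_parse_add_result (score : String) (out : Int) : Prop := out = parse_add_result_alt score
instance (score : String) (out : Int) : Decidable (Spec_parse_add_result score out) := by unfold Spec_parse_add_result; infer_instance

-- ===== CLAIM (what is proved, stated in full; the proofs are below) =====
def Claim_equal_parse_add_result : Prop := ∀ (score : String), Dom_parse_add_result score → Spec_parse_add_result score (parse_add_result score)

-- ===== LEMMAS AND PROOFS =====
theorem parseLoop_eq (cs : List Char) (t : Int) :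
    parseLoop cs t =
      if cs.any (fun c => (cardVal? c).isNone) then -1
      else t + (cs.map (fun c => (cardVal? c).getD 0)).sum := by
  induction cs generalizing t with
  | nil => simp [parseLoop]
  | cons c cs ih =>
    cases h : cardVal? c with
    | none => simp [parseLoop, h]
    | some v =>
      simp only [parseLoop, h, ih, List.any_cons, List.map_cons, List.sum_cons,
        Option.isNone_some, Bool.false_or, Option.getD_some]
      split <;> ring

-- per-character contribution of one char to the fourteen counts (seen side)
theorem deltaSeen (c : Char) :
    ((if c = '2' then (1:Int) else 0) + (if c = '3' then 1 else 0) + (if c = '4' then 1 else 0)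
     + (if c = '5' then 1 else 0) + (if c = '6' then 1 else 0) + (if c = '7' then 1 else 0)
     + (if c = '8' then 1 else 0) + (if c = '9' then 1 else 0) + (if c = 'T' then 1 else 0)
     + (if c = 'J' then 1 else 0) + (if c = 'Q' then 1 else 0) + (if c = 'K' then 1 else 0)
     + (if c = 'A' then 1 else 0) + (if c = 'C' then 1 else 0))
      = if (cardVal? c).isSome then 1 else 0 := by
  by_cases hc : c ∈ ['2','3','4','5','6','7','8','9','T','J','Q','K','A','C']
  · fin_cases hc <;> decide
  · simp only [List.mem_cons, List.not_mem_nil, or_false, not_or] at hc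
    obtain ⟨h2,h3,h4,h5,h6,h7,h8,h9,hT,hJ,hQ,hK,hA,hC⟩ := hc
    simp [cardVal?, h2, h3, h4, h5, h6, h7, h8, h9, hT, hJ, hQ, hK, hA, hC]

-- per-character contribution (total side)
theorem deltaTot (c : Char) :
    ((if c = '2' then (1:Int) else 0) * 2 + (if c = '3' then 1 else 0) * 3 + (if c = '4' then 1 else 0) * 4
     + (if c = '5' then 1 else 0) * 5 + (if c = '6' then 1 else 0) * 6 + (if c = '7' then 1 else 0) * 7
     + (if c = '8' then 1 else 0) * 8 + (if c = '9' then 1 else 0) * 9 + (if c = 'T' then 1 else 0) * 10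
     + (if c = 'J' then 1 else 0) * 10 + (if c = 'Q' then 1 else 0) * 10 + (if c = 'K' then 1 else 0) * 10
     + (if c = 'A' then 1 else 0) * 20 + (if c = 'C' then 1 else 0) * 30)
      = (cardVal? c).getD 0 := by
  by_cases hc : c ∈ ['2','3','4','5','6','7','8','9','T','J','Q','K','A','C']
  · fin_cases hc <;> decide
  · simp only [List.mem_cons, List.not_mem_nil, or_false, not_or] at hc
    obtain ⟨h2,h3,h4,h5,h6,h7,h8,h9,hT,hJ,hQ,hK,hA,hC⟩ := hc
    simp [cardVal?, h2, h3, h4, h5, h6, h7, h8, h9, hT, hJ, hQ, hK, hA, hC]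

theorem seen_sum (cs : List Char) :
    ((cs.count '2' : Int) + cs.count '3' + cs.count '4' + cs.count '5' + cs.count '6'
      + cs.count '7' + cs.count '8' + cs.count '9' + cs.count 'T' + cs.count 'J'
      + cs.count 'Q' + cs.count 'K' + cs.count 'A' + cs.count 'C')
      = (cs.countP (fun c => (cardVal? c).isSome) : Int) := by
  induction cs with
  | nil => simp
  | cons c cs ih =>
    simp only [List.count_cons, List.countP_cons, beq_iff_eq]
    push_cast
    linarith [ih, deltaSeen c]

theorem tot_sum (cs : List Char) :
    ((cs.count '2' : Int) * 2 + cs.count '3' * 3 + cs.count '4' * 4 + cs.count '5' * 5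
      + cs.count '6' * 6 + cs.count '7' * 7 + cs.count '8' * 8 + cs.count '9' * 9
      + cs.count 'T' * 10 + cs.count 'J' * 10 + cs.count 'Q' * 10 + cs.count 'K' * 10
      + cs.count 'A' * 20 + cs.count 'C' * 30)
      = (cs.map (fun c => (cardVal? c).getD 0)).sum := by
  induction cs with
  | nil => simp
  | cons c cs ih =>
    simp only [List.count_cons, List.map_cons, List.sum_cons, beq_iff_eq]
    push_cast
    linarith [ih, deltaTot c]

-- ===== VERDICT (by name: the statement is the Claim_ definition above) =====
theorem parse_add_result_spec : Claim_equal_parse_add_result := by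
  intro score _
  unfold Spec_parse_add_result parse_add_result parse_add_result_alt
  simp only [PySem.Dict.foldl_insert_getD_add_one_eq_counter, cardPairs, List.foldl_cons,
    List.foldl_nil, PySem.Dict.getD_counter, PySem.Str.len_eq, parseLoop_eq]
  by_cases h : score.toList.any (fun c => (cardVal? c).isNone)
  · simp only [h, if_true]
    have hne : (score.toList.countP (fun c => (cardVal? c).isSome) : Int)
        ≠ (score.toList.length : Int) := by
      intro heq
      have hcp : score.toList.countP (fun c => (cardVal? c).isSome) = score.toList.length := by
        exact_mod_cast heq
      obtain ⟨c, hc, hn⟩ := List.any_eq_true.mp h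
      have := (List.countP_eq_length.mp hcp) c hc
      simp [Option.isNone_iff_eq_none] at hn
      simp [hn] at this
    rw [if_neg]
    intro heq
    apply hne
    rw [← seen_sum]
    linarith [heq]
  · simp only [h, if_false, Bool.false_eq_true]
    have hall : ∀ c ∈ score.toList, (cardVal? c).isSome := by
      have h' : ∀ c ∈ score.toList, cardVal? c ≠ none := by simpa using h
      intro c hc
      exact Option.isSome_iff_ne_none.mpr (h' c hc)
    have hcp : score.toList.countP (fun c => (cardVal? c).isSome) = score.toList.length :=
      List.countP_eq_length.mpr (by intro c hc; simpa using hall c hc)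
    rw [if_pos]
    · rw [← tot_sum]; ring
    · have hs := seen_sum score.toList
      rw [hcp] at hs
      linarith [hs]
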